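-- pv_equiv track=rewrite | github.com/Adriskk/rps-game-page | scripts/func.py | extract_from_args
-- ===== SOURCE A (Python) =====
-- def extract_from_args(array: str) -> tuple:
--     levels = array.split('.')
--
--     amateur = []
--     intm = []
--     expert = []
--
--     for level in levels:
--         if level == 'amateur':
--             amateur.append(level)
--
--         elif level == 'intermediate':
--             intm.append(level)
--
--         else:
--             expert.append(level)
--
--     a_LEN = len(amateur)
--     i_LEN = len(intm)
--     e_LEN = len(expert)
--
--     return a_LEN, i_LEN, e_LEN
-- ===== SOURCE B (Python) =====
-- def extract_from_args(array: str) -> tuple: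
--     tokens = array.split('.')
--     a = tokens.count('amateur')
--     i = tokens.count('intermediate')
--     return a, i, len(tokens) - a - i
-- ===== Notes on version B (the rewrite author's own statement) =====
-- stated objective: simpler
-- what changed: Replaces the three accumulator lists and the if/elif/else branching loop with two direct list.count lookups and computes the expert count by subtraction from the total token count.
import Mathlib
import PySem

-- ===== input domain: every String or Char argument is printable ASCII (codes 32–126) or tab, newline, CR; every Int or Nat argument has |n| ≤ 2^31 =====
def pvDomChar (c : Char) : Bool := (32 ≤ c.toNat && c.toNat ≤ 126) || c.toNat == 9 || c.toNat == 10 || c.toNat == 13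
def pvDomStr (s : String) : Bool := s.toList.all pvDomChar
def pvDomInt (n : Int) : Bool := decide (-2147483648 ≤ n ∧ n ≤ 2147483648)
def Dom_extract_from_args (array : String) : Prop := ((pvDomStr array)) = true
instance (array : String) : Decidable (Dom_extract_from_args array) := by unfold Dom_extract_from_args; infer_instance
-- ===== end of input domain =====

-- B replaces A's three accumulator lists and if/elif/else loop by two direct counts
-- plus subtraction from the total; same values, simpler decomposition.

-- ===== PORT A =====
-- the for loop over levels, carrying the three lists (amateur, intm, expert)
def extract_from_args (array : String) : Int × Int × Int :=
  let levels := (PySem.Str.split? array ".").getD []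
  let acc := levels.foldl
    (fun (acc : List String × List String × List String) level =>
      if level = "amateur" then (acc.1 ++ [level], acc.2.1, acc.2.2)
      else if level = "intermediate" then (acc.1, acc.2.1 ++ [level], acc.2.2)
      else (acc.1, acc.2.1, acc.2.2 ++ [level]))
    ([], [], [])
  ((acc.1.length : Int), (acc.2.1.length : Int), (acc.2.2.length : Int))

-- ===== PORT B =====
def extract_from_args_alt (array : String) : Int × Int × Int :=
  let tokens := (PySem.Str.split? array ".").getD []
  let a : Int := PySem.List.count tokens "amateur"
  let i : Int := PySem.List.count tokens "intermediate"
  (a, i, (tokens.length : Int) - a - i)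

-- ===== PRECONDITION & SPEC =====
def Spec_extract_from_args (array : String) (out : Int × Int × Int) : Prop := out = extract_from_args_alt array
instance (array : String) (out : Int × Int × Int) : Decidable (Spec_extract_from_args array out) := by unfold Spec_extract_from_args; infer_instance

-- ===== CLAIM (what is proved, stated in full; the proofs are below) =====
def Claim_equal_extract_from_args : Prop := ∀ (array : String), Dom_extract_from_args array → Spec_extract_from_args array (extract_from_args array)

-- ===== LEMMAS AND PROOFS =====

-- the fold's accumulator lengths: amateur/intermediate counts, expert = rest
theorem extract_loop_lengths (l : List String) (am im ex : List String) :
    (l.foldl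
      (fun (acc : List String × List String × List String) level =>
        if level = "amateur" then (acc.1 ++ [level], acc.2.1, acc.2.2)
        else if level = "intermediate" then (acc.1, acc.2.1 ++ [level], acc.2.2)
        else (acc.1, acc.2.1, acc.2.2 ++ [level]))
      (am, im, ex))
    = (am ++ l.filter (· = "amateur"),
       im ++ l.filter (· = "intermediate"),
       ex ++ l.filter (fun x => ¬ (x = "amateur") ∧ ¬ (x = "intermediate"))) := by
  induction l generalizing am im ex with
  | nil => simp
  | cons h t ih =>
    by_cases h1 : h = "amateur"
    · simp [h1, List.foldl_cons, ih]
    · by_cases h2 : h = "intermediate"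
      · simp [h2, List.foldl_cons, ih]
      · simp [h1, h2, List.foldl_cons, ih]

theorem count_filter_eq (l : List String) (v : String) :
    (l.filter (· = v)).length = l.count v := by
  induction l with
  | nil => simp
  | cons h t ih => by_cases h1 : h = v <;> simp_all [List.count_cons]

theorem expert_filter_len (l : List String) :
    (l.filter (fun x => ¬ (x = "amateur") ∧ ¬ (x = "intermediate"))).length
      + l.count "amateur" + l.count "intermediate" = l.length := by
  induction l with
  | nil => simp
  | cons h t ih =>
    by_cases h1 : h = "amateur" <;> by_cases h2 : h = "intermediate" <;>
      simp_all [List.count_cons] <;> omega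

-- ===== VERDICT (by name: the statement is the Claim_ definition above) =====
theorem extract_from_args_spec : Claim_equal_extract_from_args := by
  intro array _
  unfold Spec_extract_from_args extract_from_args extract_from_args_alt
  have h := expert_filter_len ((PySem.Str.split? array ".").getD [])
  simp at h
  simp [extract_loop_lengths, count_filter_eq, Prod.ext_iff, PySem.List.count]
  omega
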